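-- pv_equiv track=rewrite | github.com/KaranPrajapati8750/SS | SS/oilAndMines.py | func
-- ===== SOURCE A (Python) =====
-- def func(solArr, arr, index, n):
--
-- 	# If the values have been distributed,
-- 	# compute the difference
-- 	if n == 0:
-- 		for i in range(len(solArr)-1):
-- 			solArr[i] = solArr[i] - solArr[i + 1]
--
-- 		return max(solArr) - min(solArr)
--
-- 	else:
--
-- 		# solArr can be constructed even if we
-- 		# don't include the current value
-- 		if index >= n:
-- 			return min(func(solArr[:] + [arr[index]], arr, index-1, n-1),
-- 					func(solArr[:], arr, index-1, n))
--
-- 		# solArr can't be constructed hence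
-- 		# we have to include the current value
-- 		else:
-- 			return func(solArr[:] + [arr[index]], arr, index-1, n-1)
-- ===== SOURCE B (Python) =====
-- def func(solArr, arr, index, n):
--     # Iterative powerset enumeration instead of include/exclude recursion:
--     # build every selection of values from indices index..0 (tagged with its
--     # size, values kept in decreasing-index order), then take one min over
--     # the metric of the size-n selections.  Return value only: unlike A, B
--     # does not mutate solArr in the n == 0 case.
--     def metric(s):
--         v = [s[i] - s[i + 1] for i in range(len(s) - 1)] + [s[-1]]
--         return max(v) - min(v)
--     if n == 0:
--         return metric(solArr)
--     picks = [(0, [])]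
--     for j in range(index, -1, -1):
--         picks = picks + [(k + 1, c + [arr[j]]) for (k, c) in picks]
--     return min(metric(solArr + c) for (k, c) in picks if k == n)
-- ===== Notes on version B (the rewrite author's own statement) =====
-- stated objective: alternative
-- what changed: Replaces the include/exclude recursion with nested mins by an iterative powerset enumeration (one fold doubling a list of (count, chosen-values) pairs over indices index..0) followed by a single min over the metric of the size-n selections.
-- outside the precondition, e.g. on func([], [1, 2, 3], 0, 2): A returns 5, B raises ValueError
import Mathlib
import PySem

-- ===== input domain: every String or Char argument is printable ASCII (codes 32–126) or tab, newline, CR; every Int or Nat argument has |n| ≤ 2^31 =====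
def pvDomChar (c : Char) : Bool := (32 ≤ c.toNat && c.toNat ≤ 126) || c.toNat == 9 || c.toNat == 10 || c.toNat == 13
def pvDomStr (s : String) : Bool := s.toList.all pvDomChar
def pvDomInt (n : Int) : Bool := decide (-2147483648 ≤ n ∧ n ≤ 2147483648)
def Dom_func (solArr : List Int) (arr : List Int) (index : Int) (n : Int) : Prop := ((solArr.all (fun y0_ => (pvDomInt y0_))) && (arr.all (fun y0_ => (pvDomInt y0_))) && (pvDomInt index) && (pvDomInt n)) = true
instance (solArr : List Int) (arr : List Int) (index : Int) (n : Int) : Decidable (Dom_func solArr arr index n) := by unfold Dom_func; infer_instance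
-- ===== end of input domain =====

-- B replaces the include/exclude recursion by an iterative powerset enumeration plus one min
-- (alternative decomposition, same exponential cost).  Return value only: A mutates solArr in
-- its n == 0 branch, B does not.

-- ===== PORT A =====
-- the in-place differencing loop 'for i in range(len(solArr)-1): solArr[i] = solArr[i] - solArr[i+1]'
def diffLoopA (solArr : List Int) : List Int :=
  (PySem.List.pyRange 0 (PySem.List.len solArr - 1) 1).foldl
    (fun s i => PySem.List.pySetD s i (PySem.List.pyGetD s i 0 - PySem.List.pyGetD s (i + 1) 0)) solArr

-- fuel = recursion depth bound; under Pre_func the initial fuel below is never exhausted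
def funcF : Nat → List Int → List Int → Int → Int → Int
  | 0, _, _, _, _ => 0
  | fuel + 1, solArr, arr, index, n =>
    if n = 0 then
      let s := diffLoopA solArr
      (PySem.List.max? s (fun x => x)).getD 0 - (PySem.List.min? s (fun x => x)).getD 0
    else if index ≥ n then
      min (funcF fuel (solArr ++ [PySem.List.pyGetD arr index 0]) arr (index - 1) (n - 1))
          (funcF fuel solArr arr (index - 1) n)
    else
      funcF fuel (solArr ++ [PySem.List.pyGetD arr index 0]) arr (index - 1) (n - 1)

def func (solArr : List Int) (arr : List Int) (index : Int) (n : Int) : Int :=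
  funcF (index.toNat + n.toNat + 1) solArr arr index n

-- ===== PORT B =====
-- metric(s) = max(v) - min(v) with v = [s[i]-s[i+1] for i in range(len(s)-1)] + [s[-1]]
def metricB (s : List Int) : Int :=
  let v := (PySem.List.pyRange 0 (PySem.List.len s - 1) 1).map
      (fun i => PySem.List.pyGetD s i 0 - PySem.List.pyGetD s (i + 1) 0)
    ++ [PySem.List.pyGetD s (-1) 0]
  (PySem.List.max? v (fun x => x)).getD 0 - (PySem.List.min? v (fun x => x)).getD 0

-- one loop step: picks = picks + [(k+1, c + [arr[j]]) for (k, c) in picks]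
def stepB (arr : List Int) (picks : List (Int × List Int)) (j : Int) : List (Int × List Int) :=
  picks ++ picks.map (fun p => (p.1 + 1, p.2 ++ [PySem.List.pyGetD arr j 0]))

-- picks after the loop 'for j in range(index, -1, -1)'
def picksB (arr : List Int) (index : Int) : List (Int × List Int) :=
  (PySem.List.pyRange index (-1) (-1)).foldl (stepB arr) [(0, [])]

def func_alt (solArr : List Int) (arr : List Int) (index : Int) (n : Int) : Int :=
  if n = 0 then metricB solArr
  else
    (PySem.List.min?
      (((picksB arr index).filter (fun p => p.1 == n)).map (fun p => metricB (solArr ++ p.2)))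
      (fun x => x)).getD 0

-- ===== PRECONDITION & SPEC =====
-- Pre_func excludes exactly the inputs where the Python A raises (n < 0: infinite recursion →
-- RecursionError; n = 0 with empty solArr: ValueError from max([]); n > 0 with index ≥ len(arr):
-- IndexError) and the infeasible inputs n > index + 1, on which A silently reads arr with
-- negative-index wraparound — an accident of the implementation whose value B cannot produce:
-- B (naturally) raises ValueError there, since no size-n selection of indices ≤ index exists.
def Pre_func (solArr : List Int) (arr : List Int) (index : Int) (n : Int) : Prop :=
  0 ≤ n ∧ n ≤ index + 1 ∧ 1 ≤ (solArr.length : Int) + n ∧ (n = 0 ∨ index < (arr.length : Int))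
instance (solArr : List Int) (arr : List Int) (index : Int) (n : Int) : Decidable (Pre_func solArr arr index n) := by unfold Pre_func; infer_instance

def pvWitness_func : List Int × List Int × Int × Int := ([1], [3, 1, 2], 2, 2)

def Spec_func (solArr : List Int) (arr : List Int) (index : Int) (n : Int) (out : Int) : Prop := out = func_alt solArr arr index n
instance (solArr : List Int) (arr : List Int) (index : Int) (n : Int) (out : Int) : Decidable (Spec_func solArr arr index n out) := by unfold Spec_func; infer_instance

-- ===== CLAIM (what is proved, stated in full; the proofs are below) =====
def Claim_equal_func : Prop := ∀ (solArr : List Int) (arr : List Int) (index : Int) (n : Int), Dom_func solArr arr index n → Pre_func solArr arr index n → Spec_func solArr arr index n (func solArr arr index n)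

-- ===== LEMMAS AND PROOFS =====

-- the value B computes for a given (index, n) selection problem
def minsel (solArr arr : List Int) (index n : Int) : Int :=
  (PySem.List.min?
    (((picksB arr index).filter (fun p => p.1 == n)).map (fun p => metricB (solArr ++ p.2)))
    (fun x => x)).getD 0

-- ---- picksB structure ----

lemma picksB_neg {arr : List Int} {index : Int} (h : index < 0) :
    picksB arr index = [(0, [])] := by
  unfold picksB
  rw [PySem.List.pyRange_neg_one_eq_nil (by omega)]
  rfl

lemma stepB_perm (arr : List Int) {l l' : List (Int × List Int)} (h : l.Perm l') (j : Int) :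
    (stepB arr l j).Perm (stepB arr l' j) := by
  unfold stepB
  exact h.append (h.map _)

lemma foldl_stepB_perm (arr : List Int) {l l' : List (Int × List Int)} (h : l.Perm l')
    (js : List Int) : (js.foldl (stepB arr) l).Perm (js.foldl (stepB arr) l') := by
  induction js generalizing l l' with
  | nil => exact h
  | cons j js ih => exact ih (stepB_perm arr h j)

lemma foldl_stepB_append (arr : List Int) (a b : List (Int × List Int)) (js : List Int) :
    (js.foldl (stepB arr) (a ++ b)).Perm
      (js.foldl (stepB arr) a ++ js.foldl (stepB arr) b) := by
  induction js generalizing a b with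
  | nil => exact List.Perm.refl _
  | cons j js ih =>
    have hsplit : (stepB arr (a ++ b) j).Perm (stepB arr a j ++ stepB arr b j) := by
      unfold stepB
      rw [List.map_append, List.append_assoc, List.append_assoc]
      exact (List.perm_append_comm_assoc b (a.map _) (b.map _)).append_left a
    exact ((foldl_stepB_perm arr hsplit js).trans (ih _ _))

lemma foldl_stepB_map (arr : List Int) (v : Int) (l : List (Int × List Int)) (js : List Int) :
    js.foldl (stepB arr) (l.map (fun p => (p.1 + 1, v :: p.2)))
      = (js.foldl (stepB arr) l).map (fun p => (p.1 + 1, v :: p.2)) := by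
  induction js generalizing l with
  | nil => rfl
  | cons j js ih =>
    have hstep : stepB arr (l.map (fun p => (p.1 + 1, v :: p.2))) j
        = (stepB arr l j).map (fun p => (p.1 + 1, v :: p.2)) := by
      simp [stepB, List.map_map]
    simp only [List.foldl_cons, hstep, ih]

lemma picksB_cons {arr : List Int} {index : Int} (h : 0 ≤ index) :
    (picksB arr index).Perm
      (picksB arr (index - 1)
        ++ (picksB arr (index - 1)).map
             (fun p => (p.1 + 1, PySem.List.pyGetD arr index 0 :: p.2))) := by
  unfold picksB
  rw [PySem.List.pyRange_neg_one_cons (by omega : (-1 : Int) < index)]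
  simp only [List.foldl_cons]
  have hstart : stepB arr [((0 : Int), ([] : List Int))] index
      = [((0 : Int), ([] : List Int))]
        ++ [((0 : Int), ([] : List Int))].map
             (fun p => (p.1 + 1, PySem.List.pyGetD arr index 0 :: p.2)) := by
    rfl
  rw [hstart]
  exact (foldl_stepB_append arr _ _ _).trans
    (List.Perm.append_left _ (by rw [foldl_stepB_map]))

lemma picksB_count_bounds (arr : List Int) (index : Int) :
    ∀ p ∈ picksB arr index, 0 ≤ p.1 ∧ p.1 ≤ ((index + 1).toNat : Int) := by
  have aux : ∀ (k : Nat) (index : Int), (index + 1).toNat ≤ k →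
      ∀ p ∈ picksB arr index, 0 ≤ p.1 ∧ p.1 ≤ ((index + 1).toNat : Int) := by
    intro k
    induction k with
    | zero =>
      intro index hk p hp
      rw [picksB_neg (by omega)] at hp
      simp at hp
      simp [hp]
    | succ k ih =>
      intro index hk p hp
      by_cases hneg : index < 0
      · rw [picksB_neg hneg] at hp
        simp at hp
        simp [hp]
      · rw [(picksB_cons (by omega)).mem_iff, List.mem_append] at hp
        rcases hp with hp | hp
        · have := ih (index - 1) (by omega) p hp
          constructor
          · exact this.1
          · have := this.2
            omega
        · rw [List.mem_map] at hp
          obtain ⟨q, hq, hqp⟩ := hp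
          have := ih (index - 1) (by omega) q hq
          subst hqp
          simp only
          constructor
          · omega
          · have := this.2
            omega
  exact aux (index + 1).toNat index le_rfl

lemma picksB_count_exists (arr : List Int) (index : Int) (k : Int)
    (h0 : 0 ≤ k) (h1 : k ≤ ((index + 1).toNat : Int)) :
    ∃ p ∈ picksB arr index, p.1 = k := by
  have aux : ∀ (f : Nat) (index : Int) (k : Int), (index + 1).toNat ≤ f → 0 ≤ k →
      k ≤ ((index + 1).toNat : Int) → ∃ p ∈ picksB arr index, p.1 = k := by
    intro f
    induction f with
    | zero =>
      intro index k hf hk0 hk1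
      refine ⟨((0 : Int), ([] : List Int)), ?_, by omega⟩
      rw [picksB_neg (by omega)]
      simp
    | succ f ih =>
      intro index k hf hk0 hk1
      by_cases hneg : index < 0
      · refine ⟨((0 : Int), ([] : List Int)), ?_, by omega⟩
        rw [picksB_neg hneg]
        simp
      · by_cases hksmall : k ≤ ((index - 1 + 1).toNat : Int)
        · obtain ⟨p, hp, hpk⟩ := ih (index - 1) k (by omega) hk0 hksmall
          refine ⟨p, ?_, hpk⟩
          rw [(picksB_cons (by omega)).mem_iff, List.mem_append]
          exact Or.inl hp
        · obtain ⟨q, hq, hqk⟩ := ih (index - 1) (k - 1) (by omega) (by omega) (by omega)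
          refine ⟨(q.1 + 1, PySem.List.pyGetD arr index 0 :: q.2), ?_, by omega⟩
          rw [(picksB_cons (by omega)).mem_iff, List.mem_append]
          exact Or.inr (List.mem_map.mpr ⟨q, hq, rfl⟩)
  exact aux (index + 1).toNat index k le_rfl h0 h1

lemma picksB_filter_zero (arr : List Int) (index : Int) :
    ((picksB arr index).filter (fun p => p.1 == 0)).Perm [((0 : Int), ([] : List Int))] := by
  have aux : ∀ (f : Nat) (index : Int), (index + 1).toNat ≤ f →
      ((picksB arr index).filter (fun p => p.1 == 0)).Perm [((0 : Int), ([] : List Int))] := by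
    intro f
    induction f with
    | zero =>
      intro index hf
      rw [picksB_neg (by omega)]
      exact List.Perm.refl _
    | succ f ih =>
      intro index hf
      by_cases hneg : index < 0
      · rw [picksB_neg hneg]
        exact List.Perm.refl _
      · refine (((picksB_cons (by omega)).filter _).trans ?_)
        rw [List.filter_append, List.filter_map]
        have hzero : (picksB arr (index - 1)).filter
            ((fun p => p.1 == 0) ∘ (fun p => (p.1 + 1, PySem.List.pyGetD arr index 0 :: p.2)))
            = [] := by
          rw [List.filter_eq_nil_iff]
          intro q hq
          have := (picksB_count_bounds arr (index - 1) q hq).1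
          simp only [Function.comp]
          simp only [beq_iff_eq]
          omega
        rw [hzero, List.map_nil, List.append_nil]
        exact ih (index - 1) (by omega)
  exact aux (index + 1).toNat index le_rfl

-- ---- min over lists ----

lemma minGetD_perm {l l' : List Int} (h : l.Perm l') :
    (PySem.List.min? l (fun x => x)).getD 0 = (PySem.List.min? l' (fun x => x)).getD 0 := by
  rcases hl : PySem.List.min? l (fun x => x) with _ | m
  · rw [PySem.List.min?_eq_none_iff] at hl
    subst hl
    rw [← h.nil_eq]
    rfl
  · rcases hl' : PySem.List.min? l' (fun x => x) with _ | m'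
    · rw [PySem.List.min?_eq_none_iff] at hl'
      subst hl'
      exact absurd h.symm.nil_eq (by
        intro hc
        rw [← hc] at hl
        simp [PySem.List.min?] at hl)
    · simp only [Option.getD_some]
      exact le_antisymm
        (PySem.List.min?_isMin hl m' (h.symm.subset (PySem.List.min?_mem hl')))
        (PySem.List.min?_isMin hl' m (h.subset (PySem.List.min?_mem hl)))

lemma minGetD_append {a b : List Int} (ha : a ≠ []) (hb : b ≠ []) :
    (PySem.List.min? (a ++ b) (fun x => x)).getD 0
      = min ((PySem.List.min? a (fun x => x)).getD 0)
            ((PySem.List.min? b (fun x => x)).getD 0) := by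
  obtain ⟨x, t, rfl⟩ := List.exists_cons_of_ne_nil ha
  obtain ⟨y, u, rfl⟩ := List.exists_cons_of_ne_nil hb
  rw [List.cons_append, PySem.List.min?_id_cons, PySem.List.min?_id_cons,
      PySem.List.min?_id_cons]
  simp only [Option.getD_some]
  rw [List.foldl_append, List.foldl_cons, List.foldl_assoc]

-- ---- the two metrics agree ----

lemma diffLoop_partial (s : List Int) :
    ∀ m : Nat, m + 1 ≤ s.length →
      (PySem.List.pyRange 0 (m : Int) 1).foldl
        (fun t i => PySem.List.pySetD t i
          (PySem.List.pyGetD t i 0 - PySem.List.pyGetD t (i + 1) 0)) s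
      = (List.range m).map (fun i => s.getD i 0 - s.getD (i + 1) 0) ++ s.drop m := by
  intro m
  induction m with
  | zero =>
    intro _
    rw [Nat.cast_zero, PySem.List.pyRange_one_eq_nil le_rfl]
    simp
  | succ m ih =>
    intro hm
    have hm1 : m < s.length := by omega
    have hcast : ((m + 1 : Nat) : Int) = (m : Int) + 1 := by push_cast; ring
    rw [hcast, PySem.List.pyRange_one_succ_right (by positivity), List.foldl_append,
        ih (by omega), List.foldl_cons, List.foldl_nil]
    have hlenpre : ((List.range m).map (fun i => s.getD i 0 - s.getD (i + 1) 0)).length = m := by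
      simp
    have hdrop : s.drop m = s[m] :: s.drop (m + 1) := List.drop_eq_getElem_cons hm1
    rw [hdrop]
    rw [PySem.List.pyGetD_natCast, PySem.List.pySetD_natCast]
    have hget1 : ((List.range m).map (fun i => s.getD i 0 - s.getD (i + 1) 0)
        ++ s[m] :: s.drop (m + 1)).getD m 0 = s[m] := by
      rw [List.getD_append_right _ _ _ _ (le_of_eq hlenpre), hlenpre]
      simp [List.getElem?_eq_getElem hm1]
    have hcast2 : ((m : Int) + 1) = ((m + 1 : Nat) : Int) := by push_cast; ring
    rw [hcast2, PySem.List.pyGetD_natCast]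
    have hget2 : ((List.range m).map (fun i => s.getD i 0 - s.getD (i + 1) 0)
        ++ s[m] :: s.drop (m + 1)).getD (m + 1) 0 = s.getD (m + 1) 0 := by
      rw [List.getD_append_right _ _ _ _ (by omega), hlenpre]
      have : m + 1 - m = 1 := by omega
      rw [this]
      rcases hlen2 : s.drop (m + 1) with _ | ⟨z, zs⟩
      · have : s.length ≤ m + 1 := by
          have := congrArg List.length hlen2
          simp at this
          omega
        simp [List.getD_eq_getElem?_getD, List.getElem?_eq_none (by omega : s.length ≤ m + 1)]
      · have hm2 : m + 1 < s.length := by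
          have := congrArg List.length hlen2
          simp at this
          omega
        rw [List.drop_eq_getElem_cons hm2] at hlen2
        simp only [List.cons.injEq] at hlen2
        simp [List.getElem?_eq_getElem hm2, hlen2.1]
    rw [hget1, hget2]
    rw [List.set_append_right _ _ (by omega)]
    rw [hlenpre]
    have : m - m = 0 := by omega
    rw [this]
    simp only [List.set_cons_zero]
    rw [List.range_succ, List.map_append]
    simp [List.getElem?_eq_getElem hm1]

lemma diffLoopA_eq (s : List Int) (hs : s ≠ []) :
    diffLoopA s
      = (List.range (s.length - 1)).map (fun i => s.getD i 0 - s.getD (i + 1) 0)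
        ++ [s.getLast hs] := by
  have hlen : 1 ≤ s.length := List.length_pos_iff.mpr hs
  unfold diffLoopA
  have hcast : PySem.List.len s - 1 = ((s.length - 1 : Nat) : Int) := by
    rw [PySem.List.len_eq]
    omega
  rw [hcast, diffLoop_partial s (s.length - 1) (by omega), List.drop_length_sub_one hs]

lemma metricA_eq_metricB (s : List Int) :
    (PySem.List.max? (diffLoopA s) (fun x => x)).getD 0
      - (PySem.List.min? (diffLoopA s) (fun x => x)).getD 0 = metricB s := by
  rcases eq_or_ne s [] with rfl | hs
  · decide
  · have hlen : 1 ≤ s.length := List.length_pos_iff.mpr hs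
    have hv : (PySem.List.pyRange 0 (PySem.List.len s - 1) 1).map
          (fun i => PySem.List.pyGetD s i 0 - PySem.List.pyGetD s (i + 1) 0)
        ++ [PySem.List.pyGetD s (-1) 0]
        = diffLoopA s := by
      rw [diffLoopA_eq s hs]
      congr 1
      · have hcast : PySem.List.len s - 1 = ((s.length - 1 : Nat) : Int) := by
          rw [PySem.List.len_eq]
          omega
        rw [hcast, PySem.List.pyRange_one, List.map_map]
        apply List.map_congr_left
        intro k _
        simp only [Function.comp, zero_add]
        have h2 : ((k : Int) + 1) = ((k + 1 : Nat) : Int) := by push_cast; ring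
        rw [h2, PySem.List.pyGetD_natCast, PySem.List.pyGetD_natCast]
      · rw [PySem.List.pyGetD_neg_one s 0 hs]
    unfold metricB
    rw [hv]

-- ---- minsel facts ----

lemma minsel_zero (solArr arr : List Int) (index : Int) :
    minsel solArr arr index 0 = metricB solArr := by
  unfold minsel
  rw [minGetD_perm ((picksB_filter_zero arr index).map _)]
  simp [PySem.List.min?]

lemma minsel_split (solArr arr : List Int) (index n : Int) (h0 : 0 < n) (hni : n ≤ index) :
    minsel solArr arr index n
      = min (minsel solArr arr (index - 1) n)
            (minsel (solArr ++ [PySem.List.pyGetD arr index 0]) arr (index - 1) (n - 1)) := by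
  unfold minsel
  rw [minGetD_perm (((picksB_cons (show (0 : Int) ≤ index by omega)).filter
        (fun p => p.1 == n)).map (fun p => metricB (solArr ++ p.2)))]
  rw [List.filter_append, List.filter_map, List.map_append, List.map_map]
  have hcond : ((picksB arr (index - 1)).filter
        ((fun p => p.1 == n) ∘ (fun p => (p.1 + 1, PySem.List.pyGetD arr index 0 :: p.2))))
      = (picksB arr (index - 1)).filter (fun p => p.1 == n - 1) := by
    apply List.filter_congr
    intro q _
    simp only [Function.comp]
    rw [Bool.eq_iff_iff]
    simp only [beq_iff_eq]
    omega
  rw [hcond]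
  have hmapf : ((picksB arr (index - 1)).filter (fun p => p.1 == n - 1)).map
        ((fun p => metricB (solArr ++ p.2))
          ∘ (fun p => (p.1 + 1, PySem.List.pyGetD arr index 0 :: p.2)))
      = ((picksB arr (index - 1)).filter (fun p => p.1 == n - 1)).map
        (fun p => metricB ((solArr ++ [PySem.List.pyGetD arr index 0]) ++ p.2)) := by
    apply List.map_congr_left
    intro q _
    simp only [Function.comp]
    rw [List.append_cons]
  rw [hmapf]
  apply minGetD_append
  · obtain ⟨p, hp, hpk⟩ := picksB_count_exists arr (index - 1) n (by omega) (by omega)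
    exact List.ne_nil_of_mem (List.mem_map_of_mem
      (List.mem_filter.mpr ⟨hp, by simp [hpk]⟩))
  · obtain ⟨p, hp, hpk⟩ := picksB_count_exists arr (index - 1) (n - 1) (by omega) (by omega)
    exact List.ne_nil_of_mem (List.mem_map_of_mem
      (List.mem_filter.mpr ⟨hp, by simp [hpk]⟩))

lemma minsel_forced (solArr arr : List Int) (index n : Int) (h0 : 0 < n) (heq : index + 1 = n) :
    minsel solArr arr index n
      = minsel (solArr ++ [PySem.List.pyGetD arr index 0]) arr (index - 1) (n - 1) := by
  unfold minsel
  rw [minGetD_perm (((picksB_cons (show (0 : Int) ≤ index by omega)).filter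
        (fun p => p.1 == n)).map (fun p => metricB (solArr ++ p.2)))]
  rw [List.filter_append, List.filter_map, List.map_append, List.map_map]
  have hnilexc : (picksB arr (index - 1)).filter (fun p => p.1 == n) = [] := by
    rw [List.filter_eq_nil_iff]
    intro q hq
    have := (picksB_count_bounds arr (index - 1) q hq).2
    simp only [beq_iff_eq]
    omega
  rw [hnilexc, List.map_nil, List.nil_append]
  have hcond : ((picksB arr (index - 1)).filter
        ((fun p => p.1 == n) ∘ (fun p => (p.1 + 1, PySem.List.pyGetD arr index 0 :: p.2))))
      = (picksB arr (index - 1)).filter (fun p => p.1 == n - 1) := by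
    apply List.filter_congr
    intro q _
    simp only [Function.comp]
    rw [Bool.eq_iff_iff]
    simp only [beq_iff_eq]
    omega
  rw [hcond]
  have hmapf : ((picksB arr (index - 1)).filter (fun p => p.1 == n - 1)).map
        ((fun p => metricB (solArr ++ p.2))
          ∘ (fun p => (p.1 + 1, PySem.List.pyGetD arr index 0 :: p.2)))
      = ((picksB arr (index - 1)).filter (fun p => p.1 == n - 1)).map
        (fun p => metricB ((solArr ++ [PySem.List.pyGetD arr index 0]) ++ p.2)) := by
    apply List.map_congr_left
    intro q _
    simp only [Function.comp]
    rw [List.append_cons]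
  rw [hmapf]

-- ---- main induction ----

lemma funcF_eq_minsel (arr : List Int) :
    ∀ (fuel : Nat) (index n : Int) (solArr : List Int),
      0 ≤ n → n ≤ index + 1 → (0 < n → index < (arr.length : Int)) →
      index.toNat + n.toNat < fuel →
      funcF fuel solArr arr index n = minsel solArr arr index n := by
  intro fuel
  induction fuel with
  | zero => intro index n solArr h0 h1 h2 hf; omega
  | succ fuel ih =>
    intro index n solArr h0 h1 h2 hf
    by_cases hn : n = 0
    · subst hn
      simp only [funcF]
      rw [minsel_zero]
      exact metricA_eq_metricB solArr
    · have hnpos : 0 < n := by omega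
      have hidx : index < (arr.length : Int) := h2 hnpos
      by_cases hge : index ≥ n
      · simp only [funcF, if_neg hn, if_pos hge]
        rw [ih (index - 1) (n - 1) (solArr ++ [PySem.List.pyGetD arr index 0]) (by omega)
              (by omega) (fun _ => by omega) (by omega),
            ih (index - 1) n solArr (by omega) (by omega) (fun _ => by omega) (by omega),
            minsel_split solArr arr index n hnpos (by omega)]
        exact min_comm _ _
      · have heq : index + 1 = n := by omega
        simp only [funcF, if_neg hn, if_neg hge]
        rw [ih (index - 1) (n - 1) (solArr ++ [PySem.List.pyGetD arr index 0]) (by omega)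
              (by omega) (fun _ => by omega) (by omega)]
        exact (minsel_forced solArr arr index n hnpos heq).symm

-- ===== VERDICT (by name: the statement is the Claim_ definition above) =====
theorem func_spec : Claim_equal_func := by
  intro solArr arr index n _ hpre
  obtain ⟨h0, h1, _h2, h3⟩ := hpre
  unfold Spec_func func func_alt
  rw [funcF_eq_minsel arr _ index n solArr h0 h1
      (fun hn => by rcases h3 with h | h
                    · omega
                    · exact h) (by omega)]
  by_cases hn : n = 0
  · simp [hn, minsel_zero]
  · simp [hn, minsel]
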